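-- pv_equiv track=rewrite | github.com/dirkwittekind/cfMeDIPseq_SpikeIn_UMI_workflow | scripts/ml/ml_visualization.py | find_gene_for_region
-- ===== SOURCE A (Python) =====
-- from typing import List, Tuple, Dict, Optional
--
-- def find_gene_for_region(chrom: str, start: int, end: int,
--                           gene_intervals: Dict[str, list]) -> Optional[str]:
--     """
--     Find the gene that overlaps with a given genomic region.
--     Returns the gene name or None if no overlap found.
--     """
--     if chrom not in gene_intervals:
--         return None
--
--     # Find overlapping genes
--     overlapping = []
--     for g_start, g_end, g_name in gene_intervals[chrom]:
--         # Check for overlap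
--         if g_start < end and g_end > start:
--             overlap_size = min(end, g_end) - max(start, g_start)
--             overlapping.append((g_name, overlap_size))
--
--     if overlapping:
--         # Return the gene with the largest overlap
--         overlapping.sort(key=lambda x: -x[1])
--         return overlapping[0][0]
--
--     return None
-- ===== SOURCE B (Python) =====
-- from typing import Dict, Optional
--
-- def find_gene_for_region(chrom: str, start: int, end: int,
--                           gene_intervals: Dict[str, list]) -> Optional[str]:
--     if chrom not in gene_intervals:
--         return None
--     best_name = None
--     best_size = 0
--     for g_start, g_end, g_name in gene_intervals[chrom]:
--         if g_start < end and g_end > start: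
--             overlap_size = min(end, g_end) - max(start, g_start)
--             if best_name is None or overlap_size > best_size:
--                 best_name = g_name
--                 best_size = overlap_size
--     return best_name
-- ===== Notes on version B (the rewrite author's own statement) =====
-- stated objective: simpler
-- what changed: Replaced collect-overlaps-into-a-list-then-stable-sort-descending-and-take-head with a single running-max scan using a strict '>' comparison, which preserves the first-occurrence tie-break and needs no intermediate list.
import Mathlib
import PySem

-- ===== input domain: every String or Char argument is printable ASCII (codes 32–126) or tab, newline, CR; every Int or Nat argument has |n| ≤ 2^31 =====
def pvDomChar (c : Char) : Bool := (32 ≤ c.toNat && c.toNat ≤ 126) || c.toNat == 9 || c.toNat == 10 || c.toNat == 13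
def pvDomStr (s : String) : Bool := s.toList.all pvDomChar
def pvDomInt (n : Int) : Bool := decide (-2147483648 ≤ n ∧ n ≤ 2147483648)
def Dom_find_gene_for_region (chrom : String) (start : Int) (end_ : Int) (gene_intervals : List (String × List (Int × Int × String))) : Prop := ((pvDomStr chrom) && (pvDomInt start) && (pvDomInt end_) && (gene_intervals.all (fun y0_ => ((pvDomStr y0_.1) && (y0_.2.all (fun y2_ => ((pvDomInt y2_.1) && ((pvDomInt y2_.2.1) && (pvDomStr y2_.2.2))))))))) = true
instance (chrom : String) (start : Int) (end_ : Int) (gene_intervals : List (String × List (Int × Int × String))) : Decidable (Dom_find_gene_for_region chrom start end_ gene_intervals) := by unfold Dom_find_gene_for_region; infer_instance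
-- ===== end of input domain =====

-- B replaces A's collect-then-stable-sort-then-take-head with a single running-max scan
-- (strict '>' keeps the first-occurrence tie-break); objective: simpler.

-- ===== PORT A =====
-- literal port: missing-chrom guard, collect (name, overlap_size) pairs,
-- stable sort by negated size, return head's name.
def find_gene_for_region (chrom : String) (start : Int) (end_ : Int) (gene_intervals : List (String × List (Int × Int × String))) : Option String :=
  match PySem.Dict.get? (PySem.Dict.mk gene_intervals) chrom with
  | none => none
  | some ivs =>
    let overlapping : List (String × Int) :=
      ivs.foldl (fun acc t =>
        if t.1 < end_ ∧ t.2.1 > start then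
          acc ++ [(t.2.2, min end_ t.2.1 - max start t.1)]
        else acc) []
    match PySem.List.sorted overlapping (fun x => -x.2) with
    | [] => none
    | h :: _ => some h.1

-- ===== PORT B =====
-- literal port of Source B: one pass keeping the current best (name, size); strict '>' update.
def find_gene_for_region_alt (chrom : String) (start : Int) (end_ : Int) (gene_intervals : List (String × List (Int × Int × String))) : Option String :=
  match PySem.Dict.get? (PySem.Dict.mk gene_intervals) chrom with
  | none => none
  | some ivs =>
    (ivs.foldl (fun best t =>
      if t.1 < end_ ∧ t.2.1 > start then
        let sz := min end_ t.2.1 - max start t.1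
        match best with
        | none => some (t.2.2, sz)
        | some b => if sz > b.2 then some (t.2.2, sz) else best
      else best) none).map Prod.fst

-- ===== PRECONDITION & SPEC =====
def Spec_find_gene_for_region (chrom : String) (start : Int) (end_ : Int) (gene_intervals : List (String × List (Int × Int × String))) (out : Option String) : Prop := out = find_gene_for_region_alt chrom start end_ gene_intervals
instance (chrom : String) (start : Int) (end_ : Int) (gene_intervals : List (String × List (Int × Int × String))) (out : Option String) : Decidable (Spec_find_gene_for_region chrom start end_ gene_intervals out) := by unfold Spec_find_gene_for_region; infer_instance

-- ===== CLAIM (what is proved, stated in full; the proofs are below) =====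
def Claim_equal_find_gene_for_region : Prop := ∀ (chrom : String) (start : Int) (end_ : Int) (gene_intervals : List (String × List (Int × Int × String))), Dom_find_gene_for_region chrom start end_ gene_intervals → Spec_find_gene_for_region chrom start end_ gene_intervals (find_gene_for_region chrom start end_ gene_intervals)

-- ===== LEMMAS AND PROOFS =====

-- B's update step, written over the collected (name, size) pairs.
def pvStep (best : Option (String × Int)) (x : String × Int) : Option (String × Int) :=
  match best with
  | none => some x
  | some b => if x.2 > b.2 then some x else best

-- head of an insertBy depends only on the old head
theorem pv_insertBy_head (x : String × Int) (acc : List (String × Int)) :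
    (PySem.List.insertBy (fun a b : String × Int => decide ((-a.2 : Int) < -b.2)) x acc).head?
      = some (match acc.head? with
              | none => x
              | some h => if ((-x.2 : Int) < -h.2) then x else h) := by
  cases acc with
  | nil => simp [PySem.List.insertBy]
  | cons h t =>
    simp only [PySem.List.insertBy, List.head?]
    split_ifs with hlt <;> simp_all

-- the head of the insertion-sort fold is exactly B's running-max fold
theorem pv_fold_head (L : List (String × Int)) (acc : List (String × Int)) :
    (L.foldl (fun a x => PySem.List.insertBy (fun a b : String × Int => decide ((-a.2 : Int) < -b.2)) x a) acc).head?
      = L.foldl pvStep acc.head? := by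
  induction L generalizing acc with
  | nil => rfl
  | cons x t ih =>
    simp only [List.foldl_cons]
    rw [ih, pv_insertBy_head]
    congr 1
    cases hh : acc.head? with
    | none => rfl
    | some h =>
      simp only [pvStep]
      by_cases hc : ((-x.2 : Int) < -h.2)
      · rw [if_pos hc, if_pos (by omega : x.2 > h.2)]
      · rw [if_neg hc, if_neg (by omega : ¬ x.2 > h.2)]

-- A's conditional-append fold is the filterMap of the interval list
theorem pv_collect (start end_ : Int) (ivs : List (Int × Int × String)) (acc : List (String × Int)) :
    ivs.foldl (fun acc t =>
        if t.1 < end_ ∧ t.2.1 > start then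
          acc ++ [(t.2.2, min end_ t.2.1 - max start t.1)]
        else acc) acc
      = acc ++ ivs.filterMap (fun t =>
          if t.1 < end_ ∧ t.2.1 > start then
            some (t.2.2, min end_ t.2.1 - max start t.1)
          else none) := by
  induction ivs generalizing acc with
  | nil => simp
  | cons t ts ih =>
    simp only [List.foldl_cons, List.filterMap_cons]
    split_ifs with hc <;> simp [ih]

-- B's guarded fold over the intervals is pvStep folded over the collected pairs
theorem pv_fuse (start end_ : Int) (ivs : List (Int × Int × String)) (b : Option (String × Int)) :
    ivs.foldl (fun best t =>
        if t.1 < end_ ∧ t.2.1 > start then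
          let sz := min end_ t.2.1 - max start t.1
          match best with
          | none => some (t.2.2, sz)
          | some b => if sz > b.2 then some (t.2.2, sz) else best
        else best) b
      = (ivs.filterMap (fun t =>
          if t.1 < end_ ∧ t.2.1 > start then
            some (t.2.2, min end_ t.2.1 - max start t.1)
          else none)).foldl pvStep b := by
  induction ivs generalizing b with
  | nil => rfl
  | cons t ts ih =>
    simp only [List.foldl_cons, List.filterMap_cons]
    split_ifs with hc
    · simp [ih, pvStep]
    · exact ih b

-- ===== VERDICT (by name: the statement is the Claim_ definition above) =====
theorem find_gene_for_region_spec : Claim_equal_find_gene_for_region := by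
  intro chrom start end_ gene_intervals _
  unfold Spec_find_gene_for_region find_gene_for_region find_gene_for_region_alt
  cases hd : PySem.Dict.get? (PySem.Dict.mk gene_intervals) chrom with
  | none => rfl
  | some ivs =>
    simp only []
    rw [pv_fuse, PySem.List.sorted_eq_foldl_insertBy, pv_collect]
    have := pv_fold_head (ivs.filterMap (fun t =>
          if t.1 < end_ ∧ t.2.1 > start then
            some (t.2.2, min end_ t.2.1 - max start t.1)
          else none)) []
    simp only [List.nil_append] at this ⊢
    cases hs : List.foldl (fun a x => PySem.List.insertBy (fun a b : String × Int => decide ((-a.2 : Int) < -b.2)) x a) []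
        (ivs.filterMap (fun t =>
          if t.1 < end_ ∧ t.2.1 > start then
            some (t.2.2, min end_ t.2.1 - max start t.1)
          else none)) with
    | nil =>
      rw [hs] at this
      simp only [List.head?] at this
      rw [← this]
      rfl
    | cons h tl =>
      rw [hs] at this
      simp only [List.head?] at this
      rw [← this]
      rfl
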